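-- pv_equiv track=rewrite | github.com/maltesIam/cyberdemo | backend/src/generators/gen_intel.py | get_intel_by_verdict
-- ===== SOURCE A (Python) =====
-- from typing import Dict, List, Tuple
--
-- def get_intel_by_verdict(intel: List[Dict]) -> Dict[str, List[Dict]]:
--     """
--     Group IOCs by verdict.
--
--     Args:
--         intel: List of IOC dictionaries
--
--     Returns:
--         Dictionary mapping verdicts to lists of IOCs
--     """
--     by_verdict: Dict[str, List[Dict]] = {
--         "malicious": [],
--         "suspicious": [],
--         "benign": [],
--     }
--
--     for ioc in intel:
--         verdict = ioc.get("verdict", "benign")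
--         if verdict in by_verdict:
--             by_verdict[verdict].append(ioc)
--
--     return by_verdict
-- ===== SOURCE B (Python) =====
-- from typing import Dict, List, Tuple
--
-- def get_intel_by_verdict(intel: List[Dict]) -> Dict[str, List[Dict]]:
--     return {
--         verdict: [ioc for ioc in intel if ioc.get("verdict", "benign") == verdict]
--         for verdict in ("malicious", "suspicious", "benign")
--     }
-- ===== Notes on version B (the rewrite author's own statement) =====
-- stated objective: simpler
-- what changed: Replaces A's single-pass mutable-bucket accumulation with a dict comprehension that filters the whole list once per fixed verdict key, preserving key order and the 'benign' default.
import Mathlib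
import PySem

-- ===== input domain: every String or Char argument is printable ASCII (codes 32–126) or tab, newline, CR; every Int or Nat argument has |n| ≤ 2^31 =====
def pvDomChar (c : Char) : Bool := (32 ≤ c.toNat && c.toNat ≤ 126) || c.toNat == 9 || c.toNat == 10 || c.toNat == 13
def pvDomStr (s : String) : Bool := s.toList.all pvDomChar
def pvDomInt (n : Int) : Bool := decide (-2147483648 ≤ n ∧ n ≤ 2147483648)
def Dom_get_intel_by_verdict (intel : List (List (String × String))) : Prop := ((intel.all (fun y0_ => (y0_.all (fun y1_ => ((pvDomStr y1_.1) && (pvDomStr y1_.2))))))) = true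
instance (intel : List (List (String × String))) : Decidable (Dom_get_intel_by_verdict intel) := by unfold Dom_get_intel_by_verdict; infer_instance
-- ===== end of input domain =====

-- B groups by filtering the list once per fixed verdict key instead of A's single pass
-- appending into mutable buckets; objective: simpler. Return-value equivalence only.

-- ===== PORT A =====
-- ioc.get("verdict", "benign")
def pvVerdictOf (ioc : List (String × String)) : String :=
  (PySem.Dict.mk ioc).getD "verdict" "benign"

def get_intel_by_verdict (intel : List (List (String × String))) : List (String × List (List (String × String))) :=
  (intel.foldl
    (fun by_verdict ioc =>
      let verdict := pvVerdictOf ioc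
      if by_verdict.contains verdict then
        by_verdict.modify verdict [] (fun l => l ++ [ioc])
      else by_verdict)
    (PySem.Dict.mk [("malicious", []), ("suspicious", []), ("benign", [])])).items

-- ===== PORT B =====
def get_intel_by_verdict_alt (intel : List (List (String × String))) : List (String × List (List (String × String))) :=
  ["malicious", "suspicious", "benign"].map
    (fun verdict => (verdict, intel.filter (fun ioc => pvVerdictOf ioc == verdict)))

-- ===== PRECONDITION & SPEC =====
def Spec_get_intel_by_verdict (intel : List (List (String × String))) (out : List (String × List (List (String × String)))) : Prop := out = get_intel_by_verdict_alt intel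
instance (intel : List (List (String × String))) (out : List (String × List (List (String × String)))) : Decidable (Spec_get_intel_by_verdict intel out) := by unfold Spec_get_intel_by_verdict; infer_instance

-- ===== CLAIM (what is proved, stated in full; the proofs are below) =====
def Claim_equal_get_intel_by_verdict : Prop := ∀ (intel : List (List (String × String))), Dom_get_intel_by_verdict intel → Spec_get_intel_by_verdict intel (get_intel_by_verdict intel)

-- ===== LEMMAS AND PROOFS =====

-- the loop body of A's port, as a named function
def pvStep (by_verdict : PySem.Dict String (List (List (String × String)))) (ioc : List (String × String)) : PySem.Dict String (List (List (String × String))) :=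
  let verdict := pvVerdictOf ioc
  if by_verdict.contains verdict then
    by_verdict.modify verdict [] (fun l => l ++ [ioc])
  else by_verdict

theorem pvStep_keys (d : PySem.Dict String (List (List (String × String)))) (ioc : List (String × String)) :
    (pvStep d ioc).keys = d.keys := by
  by_cases h : d.contains (pvVerdictOf ioc) = true <;>
    simp [pvStep, h, PySem.Dict.keys_modify]
  exact PySem.Dict.keys_insert_of_contains _ _ h

theorem pvFold_keys (intel : List (List (String × String))) (d : PySem.Dict String (List (List (String × String)))) :
    (intel.foldl pvStep d).keys = d.keys := by
  induction intel generalizing d with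
  | nil => rfl
  | cons i t ih => simp [List.foldl, ih, pvStep_keys]

theorem pvStep_getD (d : PySem.Dict String (List (List (String × String)))) (ioc : List (String × String)) (k : String)
    (hk : d.contains k = true) :
    (pvStep d ioc).getD k [] = d.getD k [] ++ (if pvVerdictOf ioc == k then [ioc] else []) := by
  by_cases hv : pvVerdictOf ioc = k
  · subst hv
    simp [pvStep, hk, PySem.Dict.getD_modify_self]
  · by_cases hc : d.contains (pvVerdictOf ioc) = true <;>
      simp [pvStep, hc, PySem.Dict.getD_modify, hv]
    exact fun h => absurd h.symm hv

theorem pvStep_contains (d : PySem.Dict String (List (List (String × String)))) (ioc : List (String × String)) (k : String) :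
    (pvStep d ioc).contains k = d.contains k := by
  rw [PySem.Dict.contains_eq_decide_mem_keys, PySem.Dict.contains_eq_decide_mem_keys, pvStep_keys]

theorem pvFold_getD (intel : List (List (String × String))) (d : PySem.Dict String (List (List (String × String)))) (k : String)
    (hk : d.contains k = true) :
    (intel.foldl pvStep d).getD k [] = d.getD k [] ++ intel.filter (fun i => pvVerdictOf i == k) := by
  induction intel generalizing d with
  | nil => simp
  | cons i t ih =>
    rw [List.foldl_cons, ih _ ((pvStep_contains d i k).trans hk), pvStep_getD d i k hk,
      List.filter_cons]
    by_cases hv : pvVerdictOf i == k <;> simp [hv]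

theorem get_intel_by_verdict_eq (intel : List (List (String × String))) :
    get_intel_by_verdict intel = get_intel_by_verdict_alt intel := by
  unfold get_intel_by_verdict get_intel_by_verdict_alt
  have hfold : intel.foldl
      (fun by_verdict ioc =>
        let verdict := pvVerdictOf ioc
        if by_verdict.contains verdict then
          by_verdict.modify verdict [] (fun l => l ++ [ioc])
        else by_verdict)
      (PySem.Dict.mk [("malicious", []), ("suspicious", []), ("benign", [])])
      = intel.foldl pvStep (PySem.Dict.mk [("malicious", []), ("suspicious", []), ("benign", [])]) := rfl
  rw [hfold]
  set d0 : PySem.Dict String (List (List (String × String))) :=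
    PySem.Dict.mk [("malicious", []), ("suspicious", []), ("benign", [])] with hd0
  have hkeys : (intel.foldl pvStep d0).keys = ["malicious", "suspicious", "benign"] :=
    pvFold_keys intel d0
  have hnd : (intel.foldl pvStep d0).keys.Nodup := by rw [hkeys]; decide
  rw [PySem.Dict.items_eq_map_keys _ hnd ([] : List (List (String × String))), hkeys]
  have hget : ∀ k : String, d0.contains k = true →
      (intel.foldl pvStep d0).getD k [] = d0.getD k [] ++ intel.filter (fun i => pvVerdictOf i == k) :=
    fun k hk => pvFold_getD intel d0 k hk
  simp only [List.map_cons, List.map_nil]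
  rw [hget "malicious" (by decide), hget "suspicious" (by decide), hget "benign" (by decide)]
  rfl

-- ===== VERDICT (by name: the statement is the Claim_ definition above) =====
theorem get_intel_by_verdict_spec : Claim_equal_get_intel_by_verdict := by
  intro intel _
  exact get_intel_by_verdict_eq intel
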